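-- pv_equiv track=rewrite | github.com/Anjiang-Wei/Quokka | baselines/batch_invariant_generation.py | check_valid_invariant_operation
-- ===== SOURCE A (Python) =====
-- def check_valid_invariant_operation(condition: str) -> bool:
--     """
--     Check if the invariant condition is valid (no ++, --, +=, -=, =)
--     Valid operators: ==, <=, >=, !=, <, >, &&, ||, !, +, -, *, /, %, etc.
--     Invalid operators: =, +=, -=, *=, /=, %=, ++, --
--     """
--     # Check for obvious invalid operations
--     invalid_ops = ['++', '--', '+=', '-=', '*=', '/=', '%=']
--     for op in invalid_ops:
--         if op in condition:
--             return False
--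
--     # Check for standalone assignment operator '='
--     # We need to distinguish '=' from '==', '<=', '>=', '!='
--     i = 0
--     while i < len(condition):
--         if condition[i] == '=':
--             # Check character before '='
--             char_before = condition[i-1] if i > 0 else None
--             # Check character after '='
--             char_after = condition[i+1] if i < len(condition) - 1 else None
--
--             # Valid cases: ==, <=, >=, !=
--             if char_before in ['=', '<', '>', '!'] or char_after == '=':
--                 i += 1
--                 continue
--             else:
--                 # This is a standalone '=' which is assignment
--                 return False
--         i += 1
--
--     return True
-- ===== SOURCE B (Python) =====
-- def check_valid_invariant_operation(condition: str) -> bool: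
--     """Single left-to-right pass: judge each character against its neighbours."""
--     n = len(condition)
--     for i, c in enumerate(condition):
--         nxt = condition[i + 1] if i + 1 < n else None
--         if c in '+-' and nxt == c:
--             return False  # ++ or --
--         if c in '+-*/%' and nxt == '=':
--             return False  # +=, -=, *=, /=, %=
--         if c == '=':
--             prev = condition[i - 1] if i > 0 else None
--             if prev not in ('=', '<', '>', '!') and nxt != '=':
--                 return False  # standalone assignment '='
--     return True
-- ===== Notes on version B (the rewrite author's own statement) =====
-- stated objective: simpler
-- what changed: Replaced A's two phases (seven whole-string substring scans for two-char operators, then a second index-based while loop with before/after lookups for standalone '=') by one left-to-right pass that judges each character against its two neighbours.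
import Mathlib
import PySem

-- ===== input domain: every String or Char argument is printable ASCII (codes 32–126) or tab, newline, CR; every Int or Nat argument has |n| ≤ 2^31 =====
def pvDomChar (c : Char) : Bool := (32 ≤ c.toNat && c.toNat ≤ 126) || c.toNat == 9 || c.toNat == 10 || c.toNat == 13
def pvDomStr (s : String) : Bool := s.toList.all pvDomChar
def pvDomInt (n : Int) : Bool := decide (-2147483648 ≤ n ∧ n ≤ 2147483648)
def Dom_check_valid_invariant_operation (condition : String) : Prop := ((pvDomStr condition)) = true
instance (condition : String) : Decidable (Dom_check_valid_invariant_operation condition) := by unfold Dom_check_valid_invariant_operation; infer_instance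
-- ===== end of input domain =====

-- B replaces A's two phases (seven substring scans, then an index loop with neighbour
-- lookups) by one left-to-right pass judging each character against its neighbours (simpler).

-- ===== PORT A =====
-- invalid_ops = ['++', '--', '+=', '-=', '*=', '/=', '%=']
def pvA_invalid_ops : List (List Char) :=
  [['+','+'], ['-','-'], ['+','='], ['-','='], ['*','='], ['/','='], ['%','=']]

-- A's while loop over the index i (char_before / char_after as Option Char, None = none)
def pvA_loop (l : List Char) (i : Nat) : Bool :=
  if h : i < l.length then
    if l[i] = '=' then
      let char_before : Option Char := if 0 < i then l[i-1]? else none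
      let char_after : Option Char := if i < l.length - 1 then l[i+1]? else none
      if char_before = some '=' ∨ char_before = some '<' ∨ char_before = some '>' ∨
         char_before = some '!' ∨ char_after = some '=' then
        pvA_loop l (i+1)
      else
        false
    else
      pvA_loop l (i+1)
  else
    true
termination_by l.length - i

def check_valid_invariant_operation (condition : String) : Bool :=
  -- for op in invalid_ops: if op in condition: return False
  if pvA_invalid_ops.any (fun op => PySem.Chars.isIn op condition.toList) then false
  else pvA_loop condition.toList 0

-- ===== PORT B =====
-- single pass carrying the previous character; next char is rest.head?
def pvB_go (prev : Option Char) : List Char → Bool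
  | [] => true
  | c :: rest =>
    let nxt := rest.head?
    if (c = '+' ∨ c = '-') ∧ nxt = some c then false          -- ++ or --
    else if (c = '+' ∨ c = '-' ∨ c = '*' ∨ c = '/' ∨ c = '%') ∧ nxt = some '=' then false  -- +=,-=,*=,/=,%=
    else if c = '=' ∧ ¬(prev = some '=' ∨ prev = some '<' ∨ prev = some '>' ∨ prev = some '!') ∧
              nxt ≠ some '=' then false                        -- standalone '='
    else pvB_go (some c) rest

def check_valid_invariant_operation_alt (condition : String) : Bool :=
  pvB_go none condition.toList

-- ===== PRECONDITION & SPEC =====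
def Spec_check_valid_invariant_operation (condition : String) (out : Bool) : Prop := out = check_valid_invariant_operation_alt condition
instance (condition : String) (out : Bool) : Decidable (Spec_check_valid_invariant_operation condition out) := by unfold Spec_check_valid_invariant_operation; infer_instance

-- ===== CLAIM (what is proved, stated in full; the proofs are below) =====
def Claim_equal_check_valid_invariant_operation : Prop := ∀ (condition : String), Dom_check_valid_invariant_operation condition → Spec_check_valid_invariant_operation condition (check_valid_invariant_operation condition)

-- ===== LEMMAS AND PROOFS =====

-- B factored into its two kinds of checks: two-char operators …
def chkPairs : List Char → Bool
  | [] => true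
  | c :: rest =>
    if ((c = '+' ∨ c = '-') ∧ rest.head? = some c) ∨
       ((c = '+' ∨ c = '-' ∨ c = '*' ∨ c = '/' ∨ c = '%') ∧ rest.head? = some '=') then false
    else chkPairs rest

-- … and the standalone '=' check (prev carried along, as in B)
def chkEq (prev : Option Char) : List Char → Bool
  | [] => true
  | c :: rest =>
    if c = '=' ∧ ¬(prev = some '=' ∨ prev = some '<' ∨ prev = some '>' ∨ prev = some '!') ∧
         rest.head? ≠ some '=' then false
    else chkEq (some c) rest

theorem pvB_go_eq_chk (l : List Char) (prev : Option Char) :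
    pvB_go prev l = (chkPairs l && chkEq prev l) := by
  induction l generalizing prev with
  | nil => rfl
  | cons c rest ih =>
    simp only [pvB_go, chkPairs, chkEq]
    split_ifs <;> simp_all <;> tauto

theorem singleton_prefix_iff (b : Char) (r : List Char) : [b] <+: r ↔ r.head? = some b := by
  cases r <;> simp [List.cons_prefix_iff]

theorem infix_pair_cons (a b c : Char) (rest : List Char) :
    [a, b] <:+: c :: rest ↔ (a = c ∧ rest.head? = some b) ∨ [a, b] <:+: rest := by
  rw [List.infix_cons_iff, List.cons_prefix_iff]
  constructor
  · rintro (⟨l', heq, hp⟩ | h)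
    · injection heq with h1 h2
      subst h1; subst h2
      exact Or.inl ⟨rfl, (singleton_prefix_iff _ _).mp hp⟩
    · exact Or.inr h
  · rintro (⟨rfl, hhd⟩ | h)
    · exact Or.inl ⟨rest, rfl, (singleton_prefix_iff _ _).mpr hhd⟩
    · exact Or.inr h

theorem chkPairs_iff (l : List Char) :
    chkPairs l = true ↔ ∀ op ∈ pvA_invalid_ops, ¬ op <:+: l := by
  induction l with
  | nil => simp [chkPairs, pvA_invalid_ops]
  | cons c rest ih =>
    rw [chkPairs]
    split_ifs with hc
    · simp only [Bool.false_eq_true, false_iff]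
      intro hall
      simp only [pvA_invalid_ops, List.forall_mem_cons, List.forall_mem_nil] at hall
      obtain ⟨h1, h2, h3, h4, h5, h6, h7, -⟩ := hall
      rcases hc with ⟨hc1, hhd⟩ | ⟨hc1, hhd⟩
      · rcases hc1 with rfl | rfl
        · exact h1 ((infix_pair_cons _ _ _ _).mpr (Or.inl ⟨rfl, hhd⟩))
        · exact h2 ((infix_pair_cons _ _ _ _).mpr (Or.inl ⟨rfl, hhd⟩))
      · rcases hc1 with rfl | rfl | rfl | rfl | rfl
        · exact h3 ((infix_pair_cons _ _ _ _).mpr (Or.inl ⟨rfl, hhd⟩))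
        · exact h4 ((infix_pair_cons _ _ _ _).mpr (Or.inl ⟨rfl, hhd⟩))
        · exact h5 ((infix_pair_cons _ _ _ _).mpr (Or.inl ⟨rfl, hhd⟩))
        · exact h6 ((infix_pair_cons _ _ _ _).mpr (Or.inl ⟨rfl, hhd⟩))
        · exact h7 ((infix_pair_cons _ _ _ _).mpr (Or.inl ⟨rfl, hhd⟩))
    · rw [ih]
      constructor
      · intro h op hop hinf
        have hop' := hop
        simp only [pvA_invalid_ops, List.mem_cons, List.not_mem_nil, or_false] at hop'
        rcases hop' with rfl | rfl | rfl | rfl | rfl | rfl | rfl <;>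
          rcases (infix_pair_cons _ _ _ _).mp hinf with ⟨rfl, hhd⟩ | h2 <;>
          first
            | exact h _ hop h2
            | exact hc (Or.inl ⟨Or.inl rfl, hhd⟩)
            | exact hc (Or.inl ⟨Or.inr rfl, hhd⟩)
            | exact hc (Or.inr ⟨Or.inl rfl, hhd⟩)
            | exact hc (Or.inr ⟨Or.inr (Or.inl rfl), hhd⟩)
            | exact hc (Or.inr ⟨Or.inr (Or.inr (Or.inl rfl)), hhd⟩)
            | exact hc (Or.inr ⟨Or.inr (Or.inr (Or.inr (Or.inl rfl))), hhd⟩)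
            | exact hc (Or.inr ⟨Or.inr (Or.inr (Or.inr (Or.inr rfl))), hhd⟩)
      · intro h op hop hinf
        exact h op hop (List.infix_cons_iff.mpr (Or.inr hinf))

theorem pvA_any_eq (l : List Char) :
    pvA_invalid_ops.any (fun op => PySem.Chars.isIn op l) = !chkPairs l := by
  by_cases h : chkPairs l = true
  · simp only [h, Bool.not_true, List.any_eq_false]
    intro op hop
    simp only [Bool.not_eq_true]
    exact (PySem.Chars.isIn_eq_false_iff op l).mpr ((chkPairs_iff l).mp h op hop)
  · simp only [Bool.not_eq_true] at h
    simp only [h, Bool.not_false, List.any_eq_true]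
    have hne := (chkPairs_iff l).not.mp (by simp [h])
    push_neg at hne
    obtain ⟨op, hop, hinf⟩ := hne
    exact ⟨op, hop, (PySem.Chars.isIn_iff_infix op l).mpr hinf⟩

theorem pvA_loop_eq_chkEq (l : List Char) (n i : Nat) (hn : l.length - i ≤ n) :
    pvA_loop l i = chkEq (if 0 < i then l[i-1]? else none) (l.drop i) := by
  induction n generalizing i with
  | zero =>
    have h : ¬ i < l.length := by omega
    rw [pvA_loop, dif_neg h, List.drop_eq_nil_of_le (by omega), chkEq]
  | succ n ihn =>
    by_cases h : i < l.length
    · rw [List.drop_eq_getElem_cons h, chkEq, pvA_loop, dif_pos h]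
      have hhd : (l.drop (i+1)).head? = l[i+1]? := List.head?_drop
      have hafter : (if i < l.length - 1 then l[i+1]? else none) = l[i+1]? := by
        split_ifs with h1
        · rfl
        · rw [List.getElem?_eq_none (by omega)]
      have hrec : pvA_loop l (i+1) = chkEq (some l[i]) (l.drop (i+1)) := by
        rw [ihn (i+1) (by omega)]
        simp only [if_pos (Nat.succ_pos i), Nat.add_sub_cancel, List.getElem?_eq_getElem h]
      simp only [hafter, hhd, hrec]
      by_cases hc : l[i] = '='
      · rw [if_pos hc]
        split_ifs with h1 h2 h2 <;> tauto
      · rw [if_neg hc, if_neg (fun hx => hc hx.1)]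
    · rw [pvA_loop, dif_neg h, List.drop_eq_nil_of_le (by omega), chkEq]

-- ===== VERDICT (by name: the statement is the Claim_ definition above) =====
theorem check_valid_invariant_operation_spec : Claim_equal_check_valid_invariant_operation := by
  intro condition _
  unfold Spec_check_valid_invariant_operation check_valid_invariant_operation check_valid_invariant_operation_alt
  rw [pvB_go_eq_chk, pvA_any_eq]
  have h0 : pvA_loop condition.toList 0 = chkEq none condition.toList := by
    simpa using pvA_loop_eq_chkEq condition.toList condition.toList.length 0 (by omega)
  cases hcp : chkPairs condition.toList <;> simp [h0]
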